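-- pv_equiv track=rewrite | github.com/g-battaglia/qymanager | midi_tools/create_custom_style.py | encode_tempo
-- ===== SOURCE A (Python) =====
-- def encode_tempo(bpm: int) -> tuple:
--     """Encode BPM into QY70 range + offset bytes.
--
--     The QY70 tempo is encoded across two domains:
--     - range: The 7-bit group header of the first encoded header block.
--              This is determined by which decoded bytes (0-6) have MSB set.
--     - offset: decoded[0] of the header (lower 7 bits, as MSB is always 0).
--
--     Formula: BPM = (range * 95 - 133) + offset
--
--     Range values and their BPM ranges:
--         range=1: BPM  -38 to  89 (bit 0 -> decoded[6] MSB)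
--         range=2: BPM   57 to 184 (bit 1 -> decoded[5] MSB)
--         range=3: BPM  152 to 279 (bits 0,1 -> decoded[5,6] MSBs)
--         range=4: BPM  247 to 374 (bit 2 -> decoded[4] MSB)
--
--     In practice only range=2 (57-184 BPM) and range=3 (152-279 BPM) are used.
--
--     Args:
--         bpm: Tempo in BPM (57-279)
--
--     Returns:
--         Tuple of (range_byte, offset_byte)
--     """
--     # Try range 2 first (most common: 57-184 BPM)
--     for r in [2, 3, 1, 4]:
--         base = r * 95 - 133
--         offset = bpm - base
--         if 0 <= offset <= 94:  # Offset 0-94 for clean range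
--             return r, offset
--
--     # Fallback: extended range
--     for r in [2, 3, 1, 4]:
--         base = r * 95 - 133
--         offset = bpm - base
--         if 0 <= offset <= 127:
--             return r, offset
--
--     # Last resort
--     return 2, max(0, min(127, bpm - 57))
-- ===== SOURCE B (Python) =====
-- def encode_tempo(bpm: int) -> tuple:
--     """Encode BPM into QY70 range + offset bytes (closed-form version)."""
--     if bpm < -38:
--         return 2, 0
--     if bpm <= 341:
--         return (bpm + 38) // 95 + 1, (bpm + 38) % 95
--     if bpm <= 374:
--         return 4, bpm - 247
--     return 2, 127
-- ===== Notes on version B (the rewrite author's own statement) =====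
-- stated objective: simpler
-- what changed: Replaces the two scanning loops over [2,3,1,4] and the clamped fallback with a direct arithmetic closed form: range=(bpm+38)//95+1 and offset=(bpm+38)%95 for -38..341, (4,bpm-247) for 342..374, and constant clamps outside.
import Mathlib
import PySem

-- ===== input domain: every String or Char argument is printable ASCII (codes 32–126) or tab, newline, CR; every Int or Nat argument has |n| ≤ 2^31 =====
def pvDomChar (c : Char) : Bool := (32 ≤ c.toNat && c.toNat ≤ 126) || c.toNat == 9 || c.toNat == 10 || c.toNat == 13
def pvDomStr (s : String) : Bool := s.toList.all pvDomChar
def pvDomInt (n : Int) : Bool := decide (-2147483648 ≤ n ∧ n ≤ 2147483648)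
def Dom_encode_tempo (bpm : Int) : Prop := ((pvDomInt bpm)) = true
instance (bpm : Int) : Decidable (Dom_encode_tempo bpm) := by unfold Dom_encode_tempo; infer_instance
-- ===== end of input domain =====

-- B replaces A's two scanning loops with a closed arithmetic form (simpler, same O(1) cost).


-- ===== PORT A =====
-- first loop: offset must be 0..94
def encodeTempoLoop1 (bpm : Int) : List Int → Option (Int × Int)
  | [] => none
  | r :: rs =>
      let base := r * 95 - 133
      let offset := bpm - base
      if 0 ≤ offset ∧ offset ≤ 94 then some (r, offset) else encodeTempoLoop1 bpm rs

-- second loop: extended offset 0..127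
def encodeTempoLoop2 (bpm : Int) : List Int → Option (Int × Int)
  | [] => none
  | r :: rs =>
      let base := r * 95 - 133
      let offset := bpm - base
      if 0 ≤ offset ∧ offset ≤ 127 then some (r, offset) else encodeTempoLoop2 bpm rs

def encode_tempo (bpm : Int) : Int × Int :=
  match encodeTempoLoop1 bpm [2, 3, 1, 4] with
  | some p => p
  | none =>
    match encodeTempoLoop2 bpm [2, 3, 1, 4] with
    | some p => p
    | none => (2, max 0 (min 127 (bpm - 57)))

-- ===== PORT B =====
def encode_tempo_alt (bpm : Int) : Int × Int :=
  if bpm < -38 then (2, 0)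
  else if bpm ≤ 341 then (PySem.Int.floordiv (bpm + 38) 95 + 1, PySem.Int.mod (bpm + 38) 95)
  else if bpm ≤ 374 then (4, bpm - 247)
  else (2, 127)

-- ===== PRECONDITION & SPEC =====
def Spec_encode_tempo (bpm : Int) (out : Int × Int) : Prop := out = encode_tempo_alt bpm
instance (bpm : Int) (out : Int × Int) : Decidable (Spec_encode_tempo bpm out) := by unfold Spec_encode_tempo; infer_instance

-- ===== CLAIM (what is proved, stated in full; the proofs are below) =====
def Claim_equal_encode_tempo : Prop := ∀ (bpm : Int), Dom_encode_tempo bpm → Spec_encode_tempo bpm (encode_tempo bpm)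

-- ===== LEMMAS AND PROOFS =====
set_option maxHeartbeats 1000000 in
theorem encode_tempo_eq (bpm : Int) : encode_tempo bpm = encode_tempo_alt bpm := by
  simp only [encode_tempo, encodeTempoLoop1, encodeTempoLoop2, encode_tempo_alt]
  rw [PySem.Int.floordiv_eq_ediv_of_pos (by norm_num), PySem.Int.mod_eq_emod_of_pos (by norm_num)]
  split_ifs <;> first
  | (simp only [Prod.mk.injEq]; omega)
  | (simp; omega)
  | simp

-- ===== VERDICT (by name: the statement is the Claim_ definition above) =====
theorem encode_tempo_spec : Claim_equal_encode_tempo := by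
  intro bpm _
  unfold Spec_encode_tempo
  exact encode_tempo_eq bpm
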